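-- pv_equiv track=rewrite | github.com/Madjid-CH/aoc2024 | src/day6/day6.py | walk_left
-- ===== SOURCE A (Python) =====
-- def walk_left(grid, agent_position):
--     x, y = agent_position
--     for i in range(y, -1, -1):
--         if grid[x][i] == "#":
--             grid[x][i + 1] = "<"
--             return grid, (x, i + 1)
--         grid[x][i] = "X"
--     return grid, (x, 0)
-- ===== SOURCE B (Python) =====
-- def walk_left(grid, agent_position):
--     x, y = agent_position
--     row = grid[x]
--     w = -1
--     for i in range(0, y + 1):
--         if row[i] == "#":
--             w = i
--     if w >= 0:
--         marked = row[:w + 1] + ["<"] + ["X"] * (y - w - 1)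
--         grid[x] = marked + row[len(marked):]
--         return grid, (x, w + 1)
--     marked = ["X"] * (y + 1)
--     grid[x] = marked + row[len(marked):]
--     return grid, (x, 0)
-- ===== Notes on version B (the rewrite author's own statement) =====
-- stated objective: alternative
-- what changed: B replaces A's single mutating walk-with-early-return by two phases: a pure scan that locates the nearest wall index, then one slice-and-concatenate rebuild of the row, instead of cell-by-cell in-place writes.
-- outside the precondition, e.g. on walk_left([['.']], (5, -1)): A returns ([['.']], (5, 0)), B raises IndexError
import Mathlib
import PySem

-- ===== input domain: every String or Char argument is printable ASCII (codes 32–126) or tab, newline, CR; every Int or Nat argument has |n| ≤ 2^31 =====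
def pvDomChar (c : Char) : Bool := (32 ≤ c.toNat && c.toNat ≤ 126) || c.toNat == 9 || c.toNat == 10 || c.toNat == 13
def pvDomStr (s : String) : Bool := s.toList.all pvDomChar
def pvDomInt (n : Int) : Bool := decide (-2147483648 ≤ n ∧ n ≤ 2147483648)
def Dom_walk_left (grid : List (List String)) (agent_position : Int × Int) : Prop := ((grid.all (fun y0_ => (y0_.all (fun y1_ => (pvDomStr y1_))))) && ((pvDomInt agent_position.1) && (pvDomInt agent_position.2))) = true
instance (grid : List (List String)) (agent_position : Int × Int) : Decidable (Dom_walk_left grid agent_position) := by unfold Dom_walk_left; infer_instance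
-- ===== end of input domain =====

-- B rebuilds the row in one slice-and-concatenate step after a pure wall-locating scan, instead of
-- A's single mutating walk with early return (objective: alternative decomposition, same cost).
-- A mutates `grid` in place; B performs the matching row assignment; the theorems below are about
-- the RETURN value.

-- ===== PORT A =====
-- grid[x][i] as a read; Python raises on out-of-range — Pre_ keeps every read in range, so the
-- default "" is never produced inside Pre_.
def pvCellGet (grid : List (List String)) (x i : Int) : String :=
  PySem.List.pyGetD ((PySem.List.pyGet? grid x).getD []) i ""

-- grid[x][i] = v; Python raises on out-of-range — Pre_ keeps every write in range, so the no-op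
-- branches are never taken inside Pre_.
def pvCellSet (grid : List (List String)) (x i : Int) (v : String) : List (List String) :=
  match PySem.List.pyIdx? grid.length x with
  | some k => grid.set k (PySem.List.pySetD (grid[k]?.getD []) i v)
  | none => grid

-- `for i in range(y, -1, -1)` as a countdown recursion over the loop variable i.
def walk_left_loop (grid : List (List String)) (x : Int) (i : Int) :
    List (List String) × (Int × Int) :=
  if _h : i < 0 then (grid, (x, 0))
  else if pvCellGet grid x i = "#" then (pvCellSet grid x (i + 1) "<", (x, i + 1))
  else walk_left_loop (pvCellSet grid x i "X") x (i - 1)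
termination_by (i + 1).toNat
decreasing_by omega

def walk_left (grid : List (List String)) (agent_position : Int × Int) :
    List (List String) × (Int × Int) :=
  walk_left_loop grid agent_position.1 agent_position.2

-- ===== PORT B =====
-- grid[x] = r (the row assignment `grid[x] = marked + row[len(marked):]` of Source B)
def pvSetRow (grid : List (List String)) (x : Int) (r : List String) : List (List String) :=
  match PySem.List.pyIdx? grid.length x with
  | some k => grid.set k r
  | none => grid

def walk_left_alt (grid : List (List String)) (agent_position : Int × Int) :
    List (List String) × (Int × Int) :=
  let x := agent_position.1
  let y := agent_position.2
  let row := (PySem.List.pyGet? grid x).getD []   -- row = grid[x]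
  let w := (PySem.List.pyRange 0 (y + 1) 1).foldl
    (fun w i => if PySem.List.pyGetD row i "" = "#" then i else w) (-1)
  if 0 ≤ w then
    let marked := PySem.List.slice row none (some (w + 1)) ++ ["<"] ++
      List.replicate (y - w - 1).toNat "X"
    (pvSetRow grid x (marked ++ row.drop marked.length), (x, w + 1))
  else
    let marked := List.replicate (y + 1).toNat "X"
    (pvSetRow grid x (marked ++ row.drop marked.length), (x, 0))

-- ===== PRECONDITION & SPEC =====
-- Pre_ excludes (a) every input on which A raises IndexError: y ≥ 0 with row index x out of
-- range, y beyond the end of row x, or the agent standing on a wall at the row's last cell (the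
-- `grid[x][i+1]` write overflows); and (b) the degenerate corner y < 0 with x out of range, where
-- A returns the grid untouched only because its loop body never runs, while B's natural
-- `row = grid[x]` raises IndexError there.
def Pre_walk_left (grid : List (List String)) (agent_position : Int × Int) : Prop :=
  (PySem.List.pyIdx? grid.length agent_position.1).isSome = true ∧
  (0 ≤ agent_position.2 →
    (agent_position.2 <
        ((grid.getD ((PySem.List.pyIdx? grid.length agent_position.1).getD 0) []).length : Int) ∧
      ((grid.getD ((PySem.List.pyIdx? grid.length agent_position.1).getD 0) []).getD
          agent_position.2.toNat "" = "#" →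
        agent_position.2 + 1 <
          ((grid.getD ((PySem.List.pyIdx? grid.length agent_position.1).getD 0) []).length : Int))))

instance (grid : List (List String)) (agent_position : Int × Int) :
    Decidable (Pre_walk_left grid agent_position) := by
  unfold Pre_walk_left; infer_instance

def pvWitness_walk_left : List (List String) × (Int × Int) := ([["#", ".", "."]], (0, 2))

def Spec_walk_left (grid : List (List String)) (agent_position : Int × Int)
    (out : List (List String) × (Int × Int)) : Prop := out = walk_left_alt grid agent_position

instance (grid : List (List String)) (agent_position : Int × Int)
    (out : List (List String) × (Int × Int)) : Decidable (Spec_walk_left grid agent_position out) := by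
  unfold Spec_walk_left; infer_instance

-- ===== CLAIM (what is proved, stated in full; the proofs are below) =====
def Claim_equal_walk_left : Prop := ∀ (grid : List (List String)) (agent_position : Int × Int),
  Dom_walk_left grid agent_position → Pre_walk_left grid agent_position →
    Spec_walk_left grid agent_position (walk_left grid agent_position)

-- ===== LEMMAS AND PROOFS =====

-- largest wall index ≤ i in the row (the index A's downward scan stops at)
def wallIdx (r : List String) (i : Int) : Option Nat :=
  if _h : i < 0 then none
  else if r.getD i.toNat "" = "#" then some i.toNat
  else wallIdx r (i - 1)
termination_by (i + 1).toNat
decreasing_by omega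

-- the row both programs produce, phrased in B's slice-and-concatenate shape
def markRow (r : List String) (i : Int) : List String :=
  match wallIdx r i with
  | some w =>
    let marked := r.take (w + 1) ++ "<" :: List.replicate (i.toNat - w - 1) "X"
    marked ++ r.drop marked.length
  | none =>
    let marked := List.replicate (i + 1).toNat "X"
    marked ++ r.drop marked.length

def markPos (r : List String) (i : Int) : Int :=
  match wallIdx r i with
  | some w => (w : Int) + 1
  | none => 0

theorem wallIdx_neg {r : List String} {i : Int} (h : i < 0) : wallIdx r i = none := by
  rw [wallIdx.eq_def]; simp [h]

theorem wallIdx_le {r : List String} {i : Int} {w : Nat} (h : wallIdx r i = some w) :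
    (w : Int) ≤ i := by
  induction i using wallIdx.induct (r := r) with
  | case1 i hi => rw [wallIdx_neg hi] at h; cases h
  | case2 i hi hw =>
    rw [wallIdx.eq_def, dif_neg hi, if_pos hw] at h
    cases h; omega
  | case3 i hi hw ih =>
    rw [wallIdx.eq_def, dif_neg hi, if_neg hw] at h
    have := ih h; omega

theorem getD_set_ne (r : List String) (m n : Nat) (v d : String) (h : n ≠ m) :
    (r.set m v).getD n d = r.getD n d := by
  simp [List.getD, List.getElem?_set_ne (Ne.symm h)]

theorem wallIdx_congr {r r' : List String} {i : Int}
    (hc : ∀ j : Nat, (j : Int) ≤ i → r'.getD j "" = r.getD j "") :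
    wallIdx r' i = wallIdx r i := by
  induction i using wallIdx.induct (r := r) with
  | case1 i hi => rw [wallIdx_neg hi, wallIdx_neg hi]
  | case2 i hi hw =>
    have h' : r'.getD i.toNat "" = r.getD i.toNat "" := hc i.toNat (by omega)
    rw [wallIdx.eq_def, dif_neg hi, h', if_pos hw,
        wallIdx.eq_def (r := r), dif_neg hi, if_pos hw]
  | case3 i hi hw ih =>
    have h' : r'.getD i.toNat "" = r.getD i.toNat "" := hc i.toNat (by omega)
    rw [wallIdx.eq_def, dif_neg hi, h', if_neg hw,
        wallIdx.eq_def (r := r), dif_neg hi, if_neg hw]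
    exact ih fun j hj => hc j (by omega)

theorem pyIdx?_lt {n : Nat} {x : Int} {k : Nat} (h : PySem.List.pyIdx? n x = some k) :
    k < n := by
  unfold PySem.List.pyIdx? at h
  split_ifs at h <;> simp_all <;> omega

theorem pyGet?_set_self (grid : List (List String)) (x : Int) (k : Nat) (r : List String)
    (hk : PySem.List.pyIdx? grid.length x = some k) (hklen : k < grid.length) :
    PySem.List.pyGet? (grid.set k r) x = some r := by
  simp [PySem.List.pyGet?, List.length_set, hk, List.getElem?_set_self hklen]

theorem cellGet_set (grid : List (List String)) (x : Int) (k : Nat) (r : List String)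
    (hk : PySem.List.pyIdx? grid.length x = some k) (hklen : k < grid.length)
    (i : Int) (h0 : 0 ≤ i) :
    pvCellGet (grid.set k r) x i = r.getD i.toNat "" := by
  rw [pvCellGet, pyGet?_set_self grid x k r hk hklen]
  simp [PySem.List.pyGetD, PySem.List.pyGet?_of_nonneg _ h0, List.getD]

theorem cellSet_set (grid : List (List String)) (x : Int) (k : Nat) (r : List String)
    (hk : PySem.List.pyIdx? grid.length x = some k) (hklen : k < grid.length)
    (i : Int) (h0 : 0 ≤ i) (v : String) :
    pvCellSet (grid.set k r) x i v = grid.set k (r.set i.toNat v) := by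
  have h2 : (grid.set k r)[k]?.getD [] = r := by
    simp [List.getElem?_set_self hklen]
  rw [pvCellSet]
  simp only [List.length_set, hk, h2, PySem.List.pySetD_of_nonneg _ _ h0, List.set_set]

theorem setRow_set (grid : List (List String)) (x : Int) (k : Nat) (r : List String)
    (hk : PySem.List.pyIdx? grid.length x = some k) :
    pvSetRow grid x r = grid.set k r := by
  rw [pvSetRow]; simp only [hk]

-- the A-side loop, characterised through wallIdx / markRow / markPos
theorem loop_char (grid : List (List String)) (x : Int) (k : Nat)
    (hk : PySem.List.pyIdx? grid.length x = some k) (hklen : k < grid.length) :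
    ∀ (n : Nat) (i : Int) (r : List String), (i + 1).toNat ≤ n → i < (r.length : Int) →
      (0 ≤ i → r.getD i.toNat "" = "#" → i + 1 < (r.length : Int)) →
      walk_left_loop (grid.set k r) x i = (grid.set k (markRow r i), (x, markPos r i)) := by
  intro n
  induction n with
  | zero =>
    intro i r hle hlen hwall
    have hi : i < 0 := by omega
    rw [walk_left_loop.eq_def, dif_pos hi, markRow, markPos, wallIdx_neg hi]
    simp [show (i + 1).toNat = 0 by omega]
  | succ n ih =>
    intro i r hle hlen hwall
    by_cases hi : i < 0
    · rw [walk_left_loop.eq_def, dif_pos hi, markRow, markPos, wallIdx_neg hi]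
      simp [show (i + 1).toNat = 0 by omega]
    · have h0 : 0 ≤ i := by omega
      have hget := cellGet_set grid x k r hk hklen i h0
      by_cases hw : r.getD i.toNat "" = "#"
      · -- wall found at i: write '<' at i+1
        have hlt : i.toNat + 1 < r.length := by
          have := hwall h0 hw; omega
        rw [walk_left_loop.eq_def, dif_neg hi, hget, if_pos hw,
            cellSet_set grid x k r hk hklen (i + 1) (by omega) "<"]
        have hw' : wallIdx r i = some i.toNat := by
          rw [wallIdx.eq_def, dif_neg hi, if_pos hw]
        rw [markRow, markPos, hw']
        have hset : r.set (i + 1).toNat "<" =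
            (r.take (i.toNat + 1) ++ "<" :: List.replicate (i.toNat - i.toNat - 1) "X") ++
              r.drop ((r.take (i.toNat + 1) ++
                "<" :: List.replicate (i.toNat - i.toNat - 1) "X").length) := by
          have hlen1 : (r.take (i.toNat + 1)).length = i.toNat + 1 := by
            simp; omega
          rw [show (i + 1).toNat = i.toNat + 1 by omega,
              List.set_eq_take_cons_drop "<" hlt]
          simp [hlen1, Nat.sub_self]
        rw [hset]
        have e : ((i.toNat : Int) + 1) = i + 1 := by omega
        dsimp only
        rw [e]
      · -- no wall at i: mark 'X' and continue at i-1
        rw [walk_left_loop.eq_def, dif_neg hi, hget, if_neg hw,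
            cellSet_set grid x k r hk hklen i h0 "X"]
        have hlen' : i - 1 < ((r.set i.toNat "X").length : Int) := by
          simp [List.length_set]; omega
        have hwall' : 0 ≤ i - 1 → (r.set i.toNat "X").getD (i - 1).toNat "" = "#" →
            i - 1 + 1 < ((r.set i.toNat "X").length : Int) := by
          intro _ _; simp [List.length_set]; omega
        rw [ih (i - 1) (r.set i.toNat "X") (by omega) hlen' hwall']
        -- the wall index is unchanged by the 'X' write at i
        have hstep : wallIdx r i = wallIdx r (i - 1) := by
          rw [wallIdx.eq_def, dif_neg hi, if_neg hw]
        have hwi : wallIdx (r.set i.toNat "X") (i - 1) = wallIdx r i := by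
          rw [wallIdx_congr fun j hj => getD_set_ne r i.toNat j "X" "" (by omega)]
          exact hstep.symm
        have hiln : i.toNat < r.length := by omega
        have hM : markRow (r.set i.toNat "X") (i - 1) = markRow r i := by
          rw [markRow, markRow, hwi]
          cases hcase : wallIdx r i with
          | none =>
            simp only [hcase]
            have h1 : ((i - 1) + 1).toNat = i.toNat := by omega
            have h2 : (i + 1).toNat = i.toNat + 1 := by omega
            rw [h1, h2, List.replicate_succ']
            have hdd : List.drop i.toNat r = r[i.toNat] :: List.drop (i.toNat + 1) r :=
              List.drop_eq_getElem_cons hiln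
            have hdrop : (r.set i.toNat "X").drop (List.replicate i.toNat "X").length =
                "X" :: r.drop (i.toNat + 1) := by
              simp only [List.length_replicate, List.drop_set]
              rw [if_neg (by omega), Nat.sub_self, hdd, List.set_cons_zero]
            rw [hdrop]
            simp
          | some w =>
            simp only [hcase]
            have hwlt : (w : Int) ≤ i - 1 := by
              have := wallIdx_le (hwi ▸ hcase : wallIdx (r.set i.toNat "X") (i - 1) = some w)
              exact this
            have htake : (r.set i.toNat "X").take (w + 1) = r.take (w + 1) := by
              rw [List.take_set, List.set_eq_of_length_le]
              simp; omega
            rw [htake]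
            by_cases hweq : w + 1 = i.toNat
            · -- wall immediately below i
              have e1 : (i - 1).toNat - w - 1 = 0 := by omega
              have e2 : i.toNat - w - 1 = 0 := by omega
              rw [e1, e2]
              have hlen1 : (r.take (w + 1)).length = w + 1 := by simp; omega
              have hdrop : (r.set i.toNat "X").drop
                  (r.take (w + 1) ++ "<" :: List.replicate 0 "X").length =
                  r.drop (r.take (w + 1) ++ "<" :: List.replicate 0 "X").length := by
                simp only [List.drop_set]
                rw [if_pos (by simp [hlen1]; omega)]
              rw [hdrop]
            · -- at least one 'X' between the wall and i
              have hwlt2 : w + 1 < i.toNat := by omega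
              have hlen1 : (r.take (w + 1)).length = w + 1 := by simp; omega
              have hmlen : (r.take (w + 1) ++ "<" :: List.replicate ((i - 1).toNat - w - 1) "X").length
                  = i.toNat := by simp [hlen1]; omega
              have hdrop : (r.set i.toNat "X").drop
                  (r.take (w + 1) ++ "<" :: List.replicate ((i - 1).toNat - w - 1) "X").length =
                  "X" :: r.drop (i.toNat + 1) := by
                rw [hmlen]
                have hdd : List.drop i.toNat r = r[i.toNat] :: List.drop (i.toNat + 1) r :=
                  List.drop_eq_getElem_cons hiln
                simp only [List.drop_set]
                rw [if_neg (by omega), Nat.sub_self, hdd, List.set_cons_zero]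
              rw [hdrop]
              have e3 : i.toNat - w - 1 = ((i - 1).toNat - w - 1) + 1 := by omega
              rw [e3, List.replicate_succ']
              simp
              omega
        have hP : markPos (r.set i.toNat "X") (i - 1) = markPos r i := by
          rw [markPos, markPos, hwi]
        rw [hM, hP]

-- the B-side fold over range(0, y+1) computes the same wall index
theorem fold_wall (r : List String) (y : Int) :
    (PySem.List.pyRange 0 (y + 1) 1).foldl
      (fun w i => if PySem.List.pyGetD r i "" = "#" then i else w) (-1) =
    (match wallIdx r y with | some w => (w : Int) | none => -1) := by
  induction y using wallIdx.induct (r := r) with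
  | case1 y hy =>
    rw [PySem.List.pyRange_one_eq_nil (by omega), wallIdx_neg hy]
    rfl
  | case2 y hy hw =>
    rw [PySem.List.pyRange_one_succ_right (by omega), List.foldl_append]
    have hget : PySem.List.pyGetD r y "" = r.getD y.toNat "" := by
      simp [PySem.List.pyGetD, PySem.List.pyGet?_of_nonneg _ (by omega : (0:Int) ≤ y), List.getD]
    simp only [List.foldl_cons, List.foldl_nil]
    rw [hget, if_pos hw, wallIdx.eq_def, dif_neg hy, if_pos hw]
    have hm : (match some y.toNat with | some w => (w : Int) | none => -1) = (y.toNat : Int) := rfl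
    rw [hm]
    omega
  | case3 y hy hw ih =>
    rw [PySem.List.pyRange_one_succ_right (by omega), List.foldl_append]
    have hget : PySem.List.pyGetD r y "" = r.getD y.toNat "" := by
      simp [PySem.List.pyGetD, PySem.List.pyGet?_of_nonneg _ (by omega : (0:Int) ≤ y), List.getD]
    simp only [List.foldl_cons, List.foldl_nil]
    rw [hget, if_neg hw, wallIdx.eq_def, dif_neg hy, if_neg hw]
    have e : y - 1 + 1 = y := by ring
    rw [e] at ih
    exact ih

-- B equals the same characterisation
theorem alt_char (grid : List (List String)) (x y : Int) (k : Nat)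
    (hk : PySem.List.pyIdx? grid.length x = some k) (hklen : k < grid.length) :
    walk_left_alt grid (x, y) =
      (grid.set k (markRow (grid[k]?.getD []) y), (x, markPos (grid[k]?.getD []) y)) := by
  have hrow : (PySem.List.pyGet? grid x).getD [] = grid[k]?.getD [] := by
    simp [PySem.List.pyGet?, hk]
  rw [walk_left_alt]
  simp only [hrow]
  rw [fold_wall (grid[k]?.getD []) y]
  cases hcase : wallIdx (grid[k]?.getD []) y with
  | some w =>
    have hwle : (w : Int) ≤ y := wallIdx_le hcase
    rw [markRow, markPos]
    simp only [hcase]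
    rw [if_pos (by omega : (0:Int) ≤ (w : Int))]
    rw [setRow_set grid x k _ hk,
        PySem.List.slice_to _ (by omega : (0:Int) ≤ (w : Int) + 1),
        show ((w : Int) + 1).toNat = w + 1 by omega,
        show (y - (w : Int) - 1).toNat = y.toNat - w - 1 by omega]
    simp
  | none =>
    rw [markRow, markPos]
    simp only [hcase]
    rw [if_neg (by omega : ¬ (0:Int) ≤ (-1 : Int)), setRow_set grid x k _ hk]

-- ===== VERDICT (by name: the statement is the Claim_ definition above) =====
theorem walk_left_spec : Claim_equal_walk_left := by
  intro grid ap _hdom hpre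
  obtain ⟨x, y⟩ := ap
  unfold Spec_walk_left
  rw [Pre_walk_left] at hpre
  obtain ⟨hsome, hcond⟩ := hpre
  cases hk : PySem.List.pyIdx? grid.length x with
  | none => rw [hk] at hsome; exact absurd hsome (by simp)
  | some k =>
    rw [hk] at hcond
    have hklen : k < grid.length := pyIdx?_lt hk
    have hrow : grid.getD ((some k).getD 0) [] = grid[k]?.getD [] := by
      simp [List.getD]
    rw [hrow] at hcond
    set r : List String := grid[k]?.getD [] with hr
    have hgrid : grid.set k r = grid := by
      rw [hr]
      simp [List.getElem?_eq_getElem hklen, List.set_getElem_self]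
    have hlen : y < (r.length : Int) := by
      by_cases h0 : 0 ≤ y
      · exact (hcond h0).1
      · omega
    have hwall : 0 ≤ y → r.getD y.toNat "" = "#" → y + 1 < (r.length : Int) := by
      intro h0 hsh
      exact (hcond h0).2 hsh
    have hA := loop_char grid x k hk hklen (y + 1).toNat y r (le_refl _) hlen hwall
    rw [hgrid] at hA
    rw [walk_left]
    simp only []
    rw [hA, alt_char grid x y k hk hklen]
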